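-- pv_equiv track=rewrite | github.com/neochen2701/TQCPans | 練習題組/挑戰題答案檔/CSF-040.py | RollDice
-- ===== SOURCE A (Python) =====
-- def RollDice(sequence):
--     W = 3
--     N = 2
--     E = 4
--     S = 5
--     cur = 1
--
--     for commands in sequence:
--         if commands == 'F':
--             N, cur, S = cur, S, 7 - cur
--         elif commands == 'L':
--             W, cur, E = cur, E, 7 - cur
--         elif commands == 'R':
--             E, cur, W = cur, W, 7 - cur
--         elif commands == 'B':
--             S, cur, N = cur, N, 7 - cur
--
--     result = f"{cur} {7 - cur} {W} {E} {N} {S}"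
--     return result
-- ===== SOURCE B (Python) =====
-- # Finite-state automaton over the 24 die orientations: a single int state is
-- # advanced through a precomputed transition table, and the answer string is
-- # read from a precomputed output table -- no face arithmetic at runtime.
-- _TRANS = [[1, 2, 3, 4], [5, 6, 7, 0], [8, 9, 0, 10], [11, 0, 9, 12], [0, 13, 14, 5], [4, 15, 16, 1], [17, 18, 1, 19], [20, 1, 18, 21], [16, 17, 21, 2], [22, 3, 2, 18], [2, 20, 19, 16], [15, 19, 20, 3], [3, 21, 17, 15], [21, 22, 4, 20], [19, 4, 22, 17], [12, 23, 5, 11], [10, 5, 23, 8], [14, 12, 8, 6], [9, 7, 6, 23], [6, 10, 11, 14], [13, 11, 10, 7], [7, 8, 12, 13], [23, 14, 13, 9], [18, 16, 15, 22]]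
-- _OUT = ['1 6 3 4 2 5', '5 2 3 4 1 6', '4 3 1 6 2 5', '3 4 6 1 2 5', '2 5 3 4 6 1', '6 1 3 4 5 2', '4 3 5 2 1 6', '3 4 2 5 1 6', '5 2 1 6 4 3', '6 1 4 3 2 5', '2 5 1 6 3 4', '5 2 6 1 3 4', '2 5 6 1 4 3', '4 3 2 5 6 1', '3 4 5 2 6 1', '4 3 6 1 5 2', '3 4 1 6 5 2', '6 1 5 2 4 3', '2 5 4 3 1 6', '1 6 5 2 3 4', '6 1 2 5 3 4', '1 6 2 5 4 3', '5 2 4 3 6 1', '1 6 4 3 5 2']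
-- _CMD = {'F': 0, 'L': 1, 'R': 2, 'B': 3}
--
--
-- def RollDice(sequence):
--     state = 0
--     for commands in sequence:
--         j = _CMD.get(commands)
--         if j is not None:
--             state = _TRANS[state][j]
--     return _OUT[state]
-- ===== Notes on version B (the rewrite author's own statement) =====
-- stated objective: alternative
-- what changed: B replaces A's live face-variable updates and 7-cur arithmetic with a precomputed 24-state finite automaton: one int state is advanced through a literal transition table and the final answer string is looked up in a literal output table, so no face values or strings are computed at runtime.
import Mathlib
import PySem

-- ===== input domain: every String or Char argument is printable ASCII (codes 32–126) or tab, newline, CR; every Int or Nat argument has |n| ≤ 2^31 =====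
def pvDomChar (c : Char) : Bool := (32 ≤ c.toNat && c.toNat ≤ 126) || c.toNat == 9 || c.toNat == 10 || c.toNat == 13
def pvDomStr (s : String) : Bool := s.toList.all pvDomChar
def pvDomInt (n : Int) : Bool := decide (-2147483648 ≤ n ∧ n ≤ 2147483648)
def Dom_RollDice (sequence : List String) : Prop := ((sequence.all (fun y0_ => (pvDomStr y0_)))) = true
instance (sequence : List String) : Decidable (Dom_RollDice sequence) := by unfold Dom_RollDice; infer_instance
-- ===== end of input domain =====

-- B replaces A's live face-variable updates with a precomputed 24-state finite
-- automaton (transition table + output-string table); objective: alternative, same cost.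

-- ===== PORT A =====
-- state (W, N, E, S, cur), exactly A's live variables
def rollDiceStepA (s : Int × Int × Int × Int × Int) (commands : String) :
    Int × Int × Int × Int × Int :=
  let (W, N, E, S, cur) := s
  if commands = "F" then (W, cur, E, 7 - cur, S)
  else if commands = "L" then (cur, N, 7 - cur, S, E)
  else if commands = "R" then (7 - cur, N, cur, S, W)
  else if commands = "B" then (W, 7 - cur, E, cur, N)
  else s

def RollDice (sequence : List String) : String :=
  let st := sequence.foldl rollDiceStepA (3, 2, 4, 5, 1)
  let (W, N, E, S, cur) := st
  PySem.Int.toStr cur ++ " " ++ PySem.Int.toStr (7 - cur) ++ " " ++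
    PySem.Int.toStr W ++ " " ++ PySem.Int.toStr E ++ " " ++
    PySem.Int.toStr N ++ " " ++ PySem.Int.toStr S

-- ===== PORT B =====
-- _TRANS: the 24×4 transition table of the orientation automaton
def diceTrans : List (List Nat) :=
  [[1, 2, 3, 4], [5, 6, 7, 0], [8, 9, 0, 10], [11, 0, 9, 12], [0, 13, 14, 5],
   [4, 15, 16, 1], [17, 18, 1, 19], [20, 1, 18, 21], [16, 17, 21, 2], [22, 3, 2, 18],
   [2, 20, 19, 16], [15, 19, 20, 3], [3, 21, 17, 15], [21, 22, 4, 20], [19, 4, 22, 17],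
   [12, 23, 5, 11], [10, 5, 23, 8], [14, 12, 8, 6], [9, 7, 6, 23], [6, 10, 11, 14],
   [13, 11, 10, 7], [7, 8, 12, 13], [23, 14, 13, 9], [18, 16, 15, 22]]

-- _OUT: the answer string of each automaton state
def diceOut : List String :=
  ["1 6 3 4 2 5", "5 2 3 4 1 6", "4 3 1 6 2 5", "3 4 6 1 2 5", "2 5 3 4 6 1",
   "6 1 3 4 5 2", "4 3 5 2 1 6", "3 4 2 5 1 6", "5 2 1 6 4 3", "6 1 4 3 2 5",
   "2 5 1 6 3 4", "5 2 6 1 3 4", "2 5 6 1 4 3", "4 3 2 5 6 1", "3 4 5 2 6 1",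
   "4 3 6 1 5 2", "3 4 1 6 5 2", "6 1 5 2 4 3", "2 5 4 3 1 6", "1 6 5 2 3 4",
   "6 1 2 5 3 4", "1 6 2 5 4 3", "5 2 4 3 6 1", "1 6 4 3 5 2"]

-- _CMD, a Python dict
def diceCmd : PySem.Dict String Nat :=
  PySem.Dict.ofList [("F", 0), ("L", 1), ("R", 2), ("B", 3)]

-- list indexing here is exact: the state stays in 0..23 and j in 0..3 (proved below)
def rollDiceStepB (state : Nat) (commands : String) : Nat :=
  match diceCmd.get? commands with
  | some j => (diceTrans.getD state []).getD j 0
  | none => state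

def RollDice_alt (sequence : List String) : String :=
  diceOut.getD (sequence.foldl rollDiceStepB 0) ""

-- ===== PRECONDITION & SPEC =====
def Spec_RollDice (sequence : List String) (out : String) : Prop := out = RollDice_alt sequence
instance (sequence : List String) (out : String) : Decidable (Spec_RollDice sequence out) := by unfold Spec_RollDice; infer_instance

-- ===== CLAIM (what is proved, stated in full; the proofs are below) =====
def Claim_equal_RollDice : Prop := ∀ (sequence : List String), Dom_RollDice sequence → Spec_RollDice sequence (RollDice sequence)

-- ===== LEMMAS AND PROOFS =====

-- A's face tuple for each automaton state
def diceState (st : Nat) : Int × Int × Int × Int × Int :=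
  [(3, 2, 4, 5, 1), (3, 1, 4, 6, 5), (1, 2, 6, 5, 4), (6, 2, 1, 5, 3), (3, 6, 4, 1, 2),
   (3, 5, 4, 2, 6), (5, 1, 2, 6, 4), (2, 1, 5, 6, 3), (1, 4, 6, 3, 5), (4, 2, 3, 5, 6),
   (1, 3, 6, 4, 2), (6, 3, 1, 4, 5), (6, 4, 1, 3, 2), (2, 6, 5, 1, 4), (5, 6, 2, 1, 3),
   (6, 5, 1, 2, 4), (1, 5, 6, 2, 3), (5, 4, 2, 3, 6), (4, 1, 3, 6, 2), (5, 3, 2, 4, 1),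
   (2, 3, 5, 4, 6), (2, 4, 5, 3, 1), (4, 6, 3, 1, 5), (4, 5, 3, 2, 1)].getD st (0, 0, 0, 0, 0)

def DiceInv (s : Int × Int × Int × Int × Int) (st : Nat) : Prop :=
  st < 24 ∧ s = diceState st

theorem diceInv_step (s : Int × Int × Int × Int × Int) (st : Nat) (c : String)
    (h : DiceInv s st) : DiceInv (rollDiceStepA s c) (rollDiceStepB st c) := by
  obtain ⟨hlt, hs⟩ := h
  subst hs
  unfold DiceInv
  by_cases hF : c = "F"
  · subst hF; interval_cases st <;> exact ⟨by decide, by decide⟩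
  by_cases hL : c = "L"
  · subst hL; interval_cases st <;> exact ⟨by decide, by decide⟩
  by_cases hR : c = "R"
  · subst hR; interval_cases st <;> exact ⟨by decide, by decide⟩
  by_cases hB : c = "B"
  · subst hB; interval_cases st <;> exact ⟨by decide, by decide⟩
  · have hd : diceCmd = ⟨[("F", (0 : Nat)), ("L", 1), ("R", 2), ("B", 3)]⟩ := by decide
    have hnone : diceCmd.get? c = none := by
      rw [hd]
      simp [PySem.Dict.get?,
        Ne.symm hF, Ne.symm hL, Ne.symm hR, Ne.symm hB]
    simp only [rollDiceStepA, rollDiceStepB, hnone, hF, hL, hR, hB, if_false]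
    exact ⟨hlt, trivial⟩

theorem diceInv_foldl (l : List String) (s : Int × Int × Int × Int × Int) (st : Nat)
    (h : DiceInv s st) :
    DiceInv (l.foldl rollDiceStepA s) (l.foldl rollDiceStepB st) := by
  induction l generalizing s st with
  | nil => exact h
  | cons c t ih => exact ih _ _ (diceInv_step s st c h)

-- A's final formatting of each state's face tuple is exactly the table entry
theorem diceOut_correct (st : Nat) (hlt : st < 24) :
    (let (W, N, E, S, cur) := diceState st
     PySem.Int.toStr cur ++ " " ++ PySem.Int.toStr (7 - cur) ++ " " ++
       PySem.Int.toStr W ++ " " ++ PySem.Int.toStr E ++ " " ++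
       PySem.Int.toStr N ++ " " ++ PySem.Int.toStr S) = diceOut.getD st "" := by
  interval_cases st <;> decide

-- ===== VERDICT (by name: the statement is the Claim_ definition above) =====
theorem RollDice_spec : Claim_equal_RollDice := by
  intro sequence _
  have h := diceInv_foldl sequence (3, 2, 4, 5, 1) 0 (by unfold DiceInv; exact ⟨by decide, by decide⟩)
  unfold Spec_RollDice RollDice RollDice_alt
  obtain ⟨hlt, hs⟩ := h
  rw [hs]
  exact diceOut_correct _ hlt
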